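-- pv_equiv track=rewrite | github.com/nastyh/LeetCode | Basic Data Structures/count_pins_on_the_screen_pinterest.py | get_max_pins
-- ===== SOURCE A (Python) =====
-- def get_max_pins(pins, screen_len):
--     """
--     O(nlogn) sort
--     O(n) for storing columns
--     Split the pins into two lists: one for the left column (L) and one for the right column (R).
--     Sort pins in each column by their bottom index.
--     greedy approach to select the maximum number of non-overlapping pins that fit within the screen length.
--     res is the max num of non-overlapping pins within the screen size
--     """
--     # Separate pins by columns
--     left_pins = [(top, bottom) for top, bottom, column in pins if column == "L"]
--     right_pins = [(top, bottom) for top, bottom, column in pins if column == "R"]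
--
--     def max_pins_in_column(pins, screen_len):
--         # Sort pins by bottom index
--         pins.sort(key=lambda x: x[1])
--         count = 0
--         current_bottom = 0
--
--         for top, bottom in pins:
--             if top >= current_bottom and bottom - top <= screen_len:
--                 count += 1
--                 current_bottom = bottom
--
--         return count
--
--     # Calculate maximum pins visible for each column
--     max_left = max_pins_in_column(left_pins, screen_len)
--     max_right = max_pins_in_column(right_pins, screen_len)
--
--     # Return the total maximum pins visible
--     return max_left + max_right
-- ===== SOURCE B (Python) =====
-- def get_max_pins(pins, screen_len):
--     # Repeated selection instead of sorting: each round scan the remaining pool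
--     # for the smallest bottom edge (first occurrence on ties), pop that pin and
--     # apply the per-column visibility test.  O(n^2) selection, no sort call.
--     pool = list(pins)
--     count = 0
--     bl = 0
--     br = 0
--     while pool:
--         m = pool[0][1]
--         for p in pool:
--             if p[1] < m:
--                 m = p[1]
--         i = 0
--         while pool[i][1] != m:
--             i += 1
--         top, bottom, column = pool.pop(i)
--         if column == "L":
--             if top >= bl and bottom - top <= screen_len:
--                 count += 1
--                 bl = bottom
--         elif column == "R":
--             if top >= br and bottom - top <= screen_len:
--                 count += 1
--                 br = bottom
--     return count
-- ===== Notes on version B (the rewrite author's own statement) =====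
-- stated objective: alternative
-- what changed: Replaces A's split-into-columns + per-column sort + greedy scan by a selection loop over one shared pool: each round scans the remaining pins for the smallest bottom edge, pops that pin and applies the per-column test, so no sort and no intermediate column lists are built.
import Mathlib
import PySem

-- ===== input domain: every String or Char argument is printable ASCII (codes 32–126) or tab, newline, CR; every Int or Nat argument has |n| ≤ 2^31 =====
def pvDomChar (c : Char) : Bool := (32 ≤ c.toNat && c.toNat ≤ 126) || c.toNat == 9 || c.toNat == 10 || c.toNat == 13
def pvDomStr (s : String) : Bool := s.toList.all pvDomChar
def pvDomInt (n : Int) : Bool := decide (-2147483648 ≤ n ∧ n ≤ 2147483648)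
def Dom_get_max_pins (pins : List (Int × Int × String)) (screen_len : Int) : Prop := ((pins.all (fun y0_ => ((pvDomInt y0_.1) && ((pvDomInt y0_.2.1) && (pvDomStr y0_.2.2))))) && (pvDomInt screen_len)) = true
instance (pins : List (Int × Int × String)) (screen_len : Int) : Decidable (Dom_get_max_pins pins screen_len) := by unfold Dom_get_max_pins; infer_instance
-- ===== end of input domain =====

-- B replaces A's split/sort/greedy pipeline by a selection loop: each round it
-- scans the remaining pool for the smallest bottom edge, pops that pin and
-- applies the per-column test (objective: alternative algorithm, no sort).

-- ===== PORT A =====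
-- the (top, bottom) projection of the comprehensions in A
def pvF (p : Int × Int × String) : Int × Int := (p.1, p.2.1)

-- loop body of max_pins_in_column: state (count, current_bottom)
def pvStepA (screen_len : Int) (st : Int × Int) (x : Int × Int) : Int × Int :=
  if x.1 ≥ st.2 ∧ x.2 - x.1 ≤ screen_len then (st.1 + 1, x.2) else st

-- A's inner helper max_pins_in_column (sort by bottom, then the greedy loop)
def pvMaxPinsInColumn (ps : List (Int × Int)) (screen_len : Int) : Int :=
  ((PySem.List.sorted ps (fun x => x.2)).foldl (pvStepA screen_len) (0, 0)).1

def get_max_pins (pins : List (Int × Int × String)) (screen_len : Int) : Int :=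
  let left_pins := (pins.filter (fun p => p.2.2 == "L")).map pvF
  let right_pins := (pins.filter (fun p => p.2.2 == "R")).map pvF
  pvMaxPinsInColumn left_pins screen_len + pvMaxPinsInColumn right_pins screen_len

-- ===== PORT B =====
-- Python's `m = pool[0][1]; for p in pool: if p[1] < m: m = p[1]`
def pvMinKey (pool : List (Int × Int × String)) : Int :=
  pool.foldl (fun m p => if p.2.1 < m then p.2.1 else m) ((pool.headD (0, 0, "")).2.1)

-- Python's `i = 0; while pool[i][1] != m: i += 1` followed by `pool.pop(i)`:
-- returns (prefix before the first pin with bottom = m, that pin, the suffix)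
def pvFindMin (m : Int) : List (Int × Int × String) →
    Option (List (Int × Int × String) × (Int × Int × String) × List (Int × Int × String))
  | [] => none
  | p :: t =>
      if p.2.1 == m then some ([], p, t)
      else (pvFindMin m t).map (fun r => (p :: r.1, r.2.1, r.2.2))

-- shape of a successful find (used for pvGo's termination)
theorem pvFindMin_split (m : Int) (l u v : List (Int × Int × String)) (x : Int × Int × String)
    (h : pvFindMin m l = some (u, x, v)) : l = u ++ x :: v := by
  induction l generalizing u with
  | nil => simp [pvFindMin] at h
  | cons p t ih =>
      by_cases hp : (p.2.1 == m) = true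
      · simp only [pvFindMin] at h
        rw [if_pos hp] at h
        injection h with h
        injection h with h1 h2
        injection h2 with h2 h3
        rw [← h1, ← h2, ← h3]
        simp
      · simp only [pvFindMin, Bool.not_eq_true] at hp
        simp only [pvFindMin, hp, Bool.false_eq_true, if_false, Option.map_eq_some_iff] at h
        obtain ⟨r, hr, he⟩ := h
        cases u with
        | nil => simp at he
        | cons a u' =>
            injection he with h1 h2
            injection h2 with h2 h3
            injection h1 with hpa hru
            have hr' : pvFindMin m t = some (u', x, v) := by
              rw [hr, ← hru, ← h2, ← h3]
            rw [List.cons_append, ← hpa, ih u' hr']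

-- B's main while-loop: state (count, bl, br); pops the first minimal-bottom pin
def pvGo (screen_len : Int) (pool : List (Int × Int × String)) (count bl br : Int) : Int :=
  match hpool : pool with
  | [] => count
  | _ :: _ =>
      match hf : pvFindMin (pvMinKey pool) pool with
      | none => count   -- unreachable (the minimum is attained); totality guard only
      | some (u, x, v) =>
          have hlen : (u ++ v).length < pool.length := by
            rw [pvFindMin_split _ _ _ _ _ hf]; simp
          if x.2.2 == "L" then
            if x.1 ≥ bl ∧ x.2.1 - x.1 ≤ screen_len then
              pvGo screen_len (u ++ v) (count + 1) x.2.1 br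
            else pvGo screen_len (u ++ v) count bl br
          else if x.2.2 == "R" then
            if x.1 ≥ br ∧ x.2.1 - x.1 ≤ screen_len then
              pvGo screen_len (u ++ v) (count + 1) bl x.2.1
            else pvGo screen_len (u ++ v) count bl br
          else pvGo screen_len (u ++ v) count bl br
termination_by pool.length
decreasing_by all_goals (subst hpool; exact hlen)

def get_max_pins_alt (pins : List (Int × Int × String)) (screen_len : Int) : Int :=
  pvGo screen_len pins 0 0 0

-- ===== PRECONDITION & SPEC =====
def Spec_get_max_pins (pins : List (Int × Int × String)) (screen_len : Int) (out : Int) : Prop := out = get_max_pins_alt pins screen_len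
instance (pins : List (Int × Int × String)) (screen_len : Int) (out : Int) : Decidable (Spec_get_max_pins pins screen_len out) := by unfold Spec_get_max_pins; infer_instance

-- ===== CLAIM (what is proved, stated in full; the proofs are below) =====
def Claim_equal_get_max_pins : Prop := ∀ (pins : List (Int × Int × String)) (screen_len : Int), Dom_get_max_pins pins screen_len → Spec_get_max_pins pins screen_len (get_max_pins pins screen_len)

-- ===== LEMMAS AND PROOFS =====

-- single-pass greedy over the sorted pool with per-column state (proof intermediate
-- between A's two passes and B's selection loop)
def pvStepB (screen_len : Int) (st : Int × Int × Int) (x : Int × Int × String) : Int × Int × Int :=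
  if x.2.1 - x.1 ≤ screen_len then
    if x.2.2 == "L" ∧ x.1 ≥ st.2.1 then (st.1 + 1, x.2.1, st.2.2)
    else if x.2.2 == "R" ∧ x.1 ≥ st.2.2 then (st.1 + 1, st.2.1, x.2.1)
    else st
  else st

-- one unfolding step of insertBy at a cons
theorem pv_insertBy_cons_pos {α : Type} (bef : α → α → Bool) (x y : α) (t : List α)
    (h : bef x y = true) : PySem.List.insertBy bef x (y :: t) = x :: y :: t := by
  simp [PySem.List.insertBy, h]

theorem pv_insertBy_cons_neg {α : Type} (bef : α → α → Bool) (x y : α) (t : List α)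
    (h : bef x y = false) :
    PySem.List.insertBy bef x (y :: t) = y :: PySem.List.insertBy bef x t := by
  simp [PySem.List.insertBy, h]

-- sorting a final singleton = one insertion into the sorted prefix
theorem pv_sorted_append_singleton {α : Type} (xs : List α) (x : α) (key : α → Int) :
    PySem.List.sorted (xs ++ [x]) key =
      PySem.List.insertBy (fun a b => decide (key a < key b)) x (PySem.List.sorted xs key) := by
  rw [PySem.List.sorted_eq_foldl_insertBy, PySem.List.sorted_eq_foldl_insertBy, List.foldl_append]
  rfl

-- insertion commutes with the (top, bottom) projection (the keys agree)
theorem pv_insertBy_map (acc : List (Int × Int × String)) (x : Int × Int × String) :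
    PySem.List.insertBy (fun a b : Int × Int => decide (a.2 < b.2)) (pvF x) (acc.map pvF) =
      (PySem.List.insertBy (fun a b : Int × Int × String => decide (a.2.1 < b.2.1)) x acc).map pvF := by
  induction acc with
  | nil => rfl
  | cons y t ih =>
      simp only [List.map_cons, PySem.List.insertBy, pvF]
      split <;> simp_all [pvF]

-- sorting the projected list = projecting the sorted list
theorem pv_sorted_map (xs : List (Int × Int × String)) :
    PySem.List.sorted (xs.map pvF) (fun x => x.2) =
      (PySem.List.sorted xs (fun x => x.2.1)).map pvF := by
  induction xs using List.reverseRecOn with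
  | nil => rfl
  | append_singleton t x ih =>
      rw [List.map_append, List.map_singleton, pv_sorted_append_singleton,
        pv_sorted_append_singleton, ih, pv_insertBy_map]

-- inserting before every element of a list
theorem pv_insertBy_all {α : Type} (bef : α → α → Bool) (x : α) (l : List α)
    (h : ∀ z ∈ l, bef x z = true) :
    PySem.List.insertBy bef x l = x :: l := by
  cases l with
  | nil => rfl
  | cons y t => simp [PySem.List.insertBy, h y (by simp)]

-- filtering commutes with one insertion into a key-sorted list
theorem pv_insertBy_filter (p : Int × Int × String → Bool) (x : Int × Int × String)
    (acc : List (Int × Int × String)) (hs : acc.Pairwise (fun a b => a.2.1 ≤ b.2.1)) :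
    (PySem.List.insertBy (fun a b : Int × Int × String => decide (a.2.1 < b.2.1)) x acc).filter p =
      if p x then
        PySem.List.insertBy (fun a b : Int × Int × String => decide (a.2.1 < b.2.1)) x (acc.filter p)
      else acc.filter p := by
  induction acc with
  | nil =>
      by_cases hp : p x <;>
        simp [PySem.List.insertBy, List.filter_cons, hp]
  | cons y t ih =>
      rcases List.pairwise_cons.mp hs with ⟨hy, ht⟩
      by_cases hlt : x.2.1 < y.2.1
      · rw [pv_insertBy_cons_pos _ _ _ _ (by simpa using hlt)]
        by_cases hp : p x
        · have hall : ∀ z ∈ (y :: t).filter p, decide (x.2.1 < z.2.1) = true := by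
            intro z hz
            have hz' : z ∈ y :: t := List.mem_of_mem_filter hz
            rcases List.mem_cons.mp hz' with h | h
            · subst h; simpa using hlt
            · have := hy z h; simp; omega
          rw [if_pos hp, pv_insertBy_all _ x _ hall, List.filter_cons, if_pos hp]
        · simp [List.filter_cons, hp]
      · rw [pv_insertBy_cons_neg _ _ _ _ (by simpa using hlt)]
        by_cases hp : p y
        · by_cases hpx : p x
          · rw [if_pos hpx, List.filter_cons, if_pos hp, List.filter_cons, if_pos hp,
              pv_insertBy_cons_neg _ _ _ _ (by simpa using hlt), ih ht, if_pos hpx]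
          · rw [if_neg hpx, List.filter_cons, if_pos hp, List.filter_cons, if_pos hp,
              ih ht, if_neg hpx]
        · rw [List.filter_cons, if_neg hp, List.filter_cons, if_neg hp, ih ht]

-- filtering commutes with the stable sort
theorem pv_filter_sorted (p : Int × Int × String → Bool) (xs : List (Int × Int × String)) :
    (PySem.List.sorted xs (fun x => x.2.1)).filter p =
      PySem.List.sorted (xs.filter p) (fun x => x.2.1) := by
  induction xs using List.reverseRecOn with
  | nil => rfl
  | append_singleton t x ih =>
      rw [pv_sorted_append_singleton,
        pv_insertBy_filter p x _ (PySem.List.sorted_pairwise t (fun x => x.2.1)), ih,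
        List.filter_append]
      by_cases hp : p x
      · rw [if_pos hp, List.filter_cons, if_pos hp, List.filter_nil, pv_sorted_append_singleton]
      · rw [if_neg hp, List.filter_cons, if_neg hp, List.filter_nil, List.append_nil]

-- the greedy count is shifted, not recomputed, by a nonzero initial count
theorem pv_stepA_shift (s : Int) (l : List (Int × Int)) :
    ∀ (c b : Int), l.foldl (pvStepA s) (c, b) =
      (c + (l.foldl (pvStepA s) (0, b)).1, (l.foldl (pvStepA s) (0, b)).2) := by
  induction l with
  | nil => intro c b; simp
  | cons x t ih =>
      intro c b
      simp only [List.foldl_cons, pvStepA]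
      by_cases h : x.1 >= b ∧ x.2 - x.1 ≤ s
      · rw [if_pos h, if_pos h, ih (c + 1), ih (0 + 1)]
        exact Prod.ext (by ring) rfl
      · rw [if_neg h, if_neg h]
        exact ih c b

-- one pass with per-column state = the two per-column greedy passes
theorem pv_stepB_decompose (s : Int) (l : List (Int × Int × String)) :
    ∀ (c bl br : Int), l.foldl (pvStepB s) (c, bl, br) =
      (c + (((l.filter (fun p => p.2.2 == "L")).map pvF).foldl (pvStepA s) (0, bl)).1
         + (((l.filter (fun p => p.2.2 == "R")).map pvF).foldl (pvStepA s) (0, br)).1,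
       (((l.filter (fun p => p.2.2 == "L")).map pvF).foldl (pvStepA s) (0, bl)).2,
       (((l.filter (fun p => p.2.2 == "R")).map pvF).foldl (pvStepA s) (0, br)).2) := by
  induction l with
  | nil => intro c bl br; simp
  | cons x t ih =>
      intro c bl br
      by_cases hL : x.2.2 = "L"
      · have hLb : (x.2.2 == "L") = true := by simp [hL]
        have hRb : (x.2.2 == "R") = false := by simp [hL]
        simp only [List.foldl_cons, List.filter_cons, hLb, hRb, Bool.false_eq_true, if_true,
          if_false, List.map_cons, cond_true, cond_false]
        by_cases hfit : x.2.1 - x.1 ≤ s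
        · by_cases htop : x.1 ≥ bl
          · have e1 : pvStepB s (c, bl, br) x = (c + 1, x.2.1, br) := by
              simp [pvStepB, hLb, hfit, htop]
            have e2 : pvStepA s (0, bl) (pvF x) = (0 + 1, x.2.1) := by
              simp [pvStepA, pvF, htop, hfit]
            rw [e1, ih, e2, pv_stepA_shift s _ (0 + 1) x.2.1]
            exact Prod.ext (by ring) rfl
          · have e1 : pvStepB s (c, bl, br) x = (c, bl, br) := by
              simp [pvStepB, hLb, hRb, hfit, htop]
            have e2 : pvStepA s (0, bl) (pvF x) = (0, bl) := by
              have : ¬ ((pvF x).1 ≥ bl ∧ (pvF x).2 - (pvF x).1 ≤ s) := by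
                simp only [pvF]; tauto
              simp only [pvStepA, if_neg this]
            rw [e1, ih, e2]
        · have e1 : pvStepB s (c, bl, br) x = (c, bl, br) := by
            simp [pvStepB, hfit]
          have e2 : pvStepA s (0, bl) (pvF x) = (0, bl) := by
            have : ¬ ((pvF x).1 ≥ bl ∧ (pvF x).2 - (pvF x).1 ≤ s) := by
              simp only [pvF]; tauto
            simp only [pvStepA, if_neg this]
          rw [e1, ih, e2]
      · by_cases hR : x.2.2 = "R"
        · have hLb : (x.2.2 == "L") = false := by simp [hL]
          have hRb : (x.2.2 == "R") = true := by simp [hR]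
          simp only [List.foldl_cons, List.filter_cons, hLb, hRb, Bool.false_eq_true, if_true,
            if_false, List.map_cons, cond_true, cond_false]
          by_cases hfit : x.2.1 - x.1 ≤ s
          · by_cases htop : x.1 ≥ br
            · have e1 : pvStepB s (c, bl, br) x = (c + 1, bl, x.2.1) := by
                simp [pvStepB, hLb, hRb, hfit, htop]
              have e2 : pvStepA s (0, br) (pvF x) = (0 + 1, x.2.1) := by
                simp [pvStepA, pvF, htop, hfit]
              rw [e1, ih, e2, pv_stepA_shift s _ (0 + 1) x.2.1]
              exact Prod.ext (by ring) rfl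
            · have e1 : pvStepB s (c, bl, br) x = (c, bl, br) := by
                simp [pvStepB, hLb, hRb, hfit, htop]
              have e2 : pvStepA s (0, br) (pvF x) = (0, br) := by
                have : ¬ ((pvF x).1 ≥ br ∧ (pvF x).2 - (pvF x).1 ≤ s) := by
                  simp only [pvF]; tauto
                simp only [pvStepA, if_neg this]
              rw [e1, ih, e2]
          · have e1 : pvStepB s (c, bl, br) x = (c, bl, br) := by
              simp [pvStepB, hfit]
            have e2 : pvStepA s (0, br) (pvF x) = (0, br) := by
              have : ¬ ((pvF x).1 ≥ br ∧ (pvF x).2 - (pvF x).1 ≤ s) := by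
                simp only [pvF]; tauto
              simp only [pvStepA, if_neg this]
            rw [e1, ih, e2]
        · have hLb : (x.2.2 == "L") = false := by simp [hL]
          have hRb : (x.2.2 == "R") = false := by simp [hR]
          have e1 : pvStepB s (c, bl, br) x = (c, bl, br) := by
            simp [pvStepB, hLb, hRb]
          simp only [List.foldl_cons, List.filter_cons, hLb, hRb, Bool.false_eq_true, if_false,
            cond_false]
          rw [e1, ih]

-- extracting a first minimum from a list sorts as head ∷ sorted rest
theorem pv_sorted_extract (key : Int × Int × String → Int)
    (u v : List (Int × Int × String)) (x : Int × Int × String)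
    (hu : ∀ z ∈ u, key x < key z) (hv : ∀ z ∈ v, key x ≤ key z) :
    PySem.List.sorted (u ++ x :: v) key = x :: PySem.List.sorted (u ++ v) key := by
  induction v using List.reverseRecOn with
  | nil =>
      have : u ++ x :: ([] : List (Int × Int × String)) = u ++ [x] := by simp
      rw [this, pv_sorted_append_singleton, pv_insertBy_all]
      · simp
      · intro z hz
        have : z ∈ u := (PySem.List.mem_sorted u key false z).mp hz
        simpa using hu z this
  | append_singleton v' y ih =>
      have hv' : ∀ z ∈ v', key x ≤ key z := fun z hz => hv z (by simp [hz])
      have hxy : key x ≤ key y := hv y (by simp)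
      have e1 : u ++ x :: (v' ++ [y]) = (u ++ x :: v') ++ [y] := by simp
      have e2 : u ++ (v' ++ [y]) = (u ++ v') ++ [y] := by simp
      rw [e1, e2, pv_sorted_append_singleton, ih hv', pv_insertBy_cons_neg, ← pv_sorted_append_singleton]
      simp; omega

-- pvMinKey is a lower bound on the bottoms of the pool
theorem pv_minKey_le (h : Int × Int × String) (t : List (Int × Int × String)) :
    ∀ z ∈ h :: t, pvMinKey (h :: t) ≤ z.2.1 := by
  suffices H : ∀ (l : List (Int × Int × String)) (m : Int),
      (l.foldl (fun m p => if p.2.1 < m then p.2.1 else m) m) ≤ m ∧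
      ∀ z ∈ l, (l.foldl (fun m p => if p.2.1 < m then p.2.1 else m) m) ≤ z.2.1 by
    intro z hz
    rcases List.mem_cons.mp hz with hz | hz
    · rw [hz]
      simpa [pvMinKey] using (H (h :: t) h.2.1).1
    · have := (H (h :: t) h.2.1).2 z (by simp [hz])
      simpa [pvMinKey] using this
  intro l
  induction l with
  | nil => intro m; simp
  | cons p t ih =>
      intro m
      simp only [List.foldl_cons]
      by_cases hp : p.2.1 < m
      · rw [if_pos hp]
        refine ⟨le_trans (ih p.2.1).1 (le_of_lt hp), ?_⟩
        intro z hz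
        rcases List.mem_cons.mp hz with hz | hz
        · rw [hz]; exact (ih p.2.1).1
        · exact (ih p.2.1).2 z hz
      · rw [if_neg hp]
        refine ⟨(ih m).1, ?_⟩
        intro z hz
        rcases List.mem_cons.mp hz with hz | hz
        · subst hz; exact le_trans (ih m).1 (by omega)
        · exact (ih m).2 z hz

-- pvMinKey is attained in the pool
theorem pv_minKey_mem (h : Int × Int × String) (t : List (Int × Int × String)) :
    ∃ z ∈ h :: t, z.2.1 = pvMinKey (h :: t) := by
  suffices H : ∀ (l : List (Int × Int × String)) (m : Int),
      (l.foldl (fun m p => if p.2.1 < m then p.2.1 else m) m) = m ∨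
      ∃ z ∈ l, z.2.1 = l.foldl (fun m p => if p.2.1 < m then p.2.1 else m) m by
    rcases H (h :: t) h.2.1 with H1 | H1
    · exact ⟨h, by simp, by simp [pvMinKey, H1]⟩
    · obtain ⟨z, hz, he⟩ := H1
      exact ⟨z, hz, by simp [pvMinKey, he]⟩
  intro l
  induction l with
  | nil => intro m; left; rfl
  | cons p t ih =>
      intro m
      simp only [List.foldl_cons]
      by_cases hp : p.2.1 < m
      · rw [if_pos hp]
        rcases ih p.2.1 with H1 | H1
        · right; exact ⟨p, by simp, H1.symm⟩
        · obtain ⟨z, hz, he⟩ := H1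
          right; exact ⟨z, by simp [hz], he⟩
      · rw [if_neg hp]
        rcases ih m with H1 | H1
        · left; exact H1
        · obtain ⟨z, hz, he⟩ := H1
          right; exact ⟨z, by simp [hz], he⟩

-- a successful find: the element has the key, everything before it does not
theorem pvFindMin_props (m : Int) (l u v : List (Int × Int × String)) (x : Int × Int × String)
    (h : pvFindMin m l = some (u, x, v)) : x.2.1 = m ∧ ∀ z ∈ u, z.2.1 ≠ m := by
  induction l generalizing u with
  | nil => simp [pvFindMin] at h
  | cons p t ih =>
      by_cases hp : (p.2.1 == m) = true
      · simp only [pvFindMin] at h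
        rw [if_pos hp] at h
        injection h with h
        injection h with h1 h2
        injection h2 with h2 h3
        refine ⟨by rw [← h2]; simpa using hp, ?_⟩
        intro z hz; rw [← h1] at hz; simp at hz
      · simp only [pvFindMin, Bool.not_eq_true] at hp
        simp only [pvFindMin, hp, Bool.false_eq_true, if_false, Option.map_eq_some_iff] at h
        obtain ⟨r, hr, he⟩ := h
        cases u with
        | nil => simp at he
        | cons a u' =>
            injection he with h1 h2
            injection h2 with h2 h3
            injection h1 with hpa hru
            have hr' : pvFindMin m t = some (u', x, v) := by
              rw [hr, ← hru, ← h2, ← h3]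
            have := ih u' hr'
            refine ⟨this.1, ?_⟩
            intro z hz
            rcases List.mem_cons.mp hz with hz | hz
            · subst hz; rw [← hpa]; simpa using hp
            · exact this.2 z hz

-- on a nonempty pool the find succeeds
theorem pvFindMin_isSome (m : Int) (l : List (Int × Int × String))
    (h : ∃ z ∈ l, z.2.1 = m) : (pvFindMin m l).isSome := by
  induction l with
  | nil => simp at h
  | cons p t ih =>
      by_cases hp : (p.2.1 == m) = true
      · simp [pvFindMin, hp]
      · simp only [pvFindMin, Bool.not_eq_true] at hp
        simp only [pvFindMin, hp, Bool.false_eq_true, if_false, Option.isSome_map]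
        apply ih
        obtain ⟨z, hz, he⟩ := h
        rcases List.mem_cons.mp hz with hz | hz
        · subst hz; simp [he] at hp
        · exact ⟨z, hz, he⟩

-- B's selection loop computes the single sorted greedy pass
theorem pv_go_eq_fold (s : Int) : ∀ (n : ℕ) (pool : List (Int × Int × String)),
    pool.length ≤ n → ∀ (c bl br : Int),
    pvGo s pool c bl br = ((PySem.List.sorted pool (fun x => x.2.1)).foldl (pvStepB s) (c, bl, br)).1 := by
  intro n
  induction n with
  | zero =>
      intro pool hlen c bl br
      have : pool = [] := List.length_eq_zero_iff.mp (Nat.le_zero.mp hlen)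
      subst this
      simp [pvGo, PySem.List.sorted]
  | succ n ih =>
      intro pool hlen c bl br
      match pool with
      | [] => simp [pvGo, PySem.List.sorted]
      | h :: t =>
          have hattain := pv_minKey_mem h t
          have hsome := pvFindMin_isSome (pvMinKey (h :: t)) (h :: t) hattain
          obtain ⟨⟨u, x, v⟩, hf⟩ := Option.isSome_iff_exists.mp hsome
          have hsplit := pvFindMin_split _ _ _ _ _ hf
          have hprops := pvFindMin_props _ _ _ _ _ hf
          have hle := pv_minKey_le h t
          have hu : ∀ z ∈ u, x.2.1 < z.2.1 := by
            intro z hz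
            have h1 : pvMinKey (h :: t) ≤ z.2.1 := hle z (by rw [hsplit]; simp [hz])
            have h2 := hprops.2 z hz
            omega
          have hv : ∀ z ∈ v, x.2.1 ≤ z.2.1 := by
            intro z hz
            have h1 : pvMinKey (h :: t) ≤ z.2.1 := hle z (by rw [hsplit]; simp [hz])
            omega
          have hlen' : (u ++ v).length ≤ n := by
            have : (h :: t).length = (u ++ x :: v).length := by rw [← hsplit]
            simp at this hlen ⊢
            omega
          have hsorted : PySem.List.sorted (h :: t) (fun x => x.2.1) =
              x :: PySem.List.sorted (u ++ v) (fun x => x.2.1) := by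
            rw [hsplit]; exact pv_sorted_extract _ u v x hu hv
          rw [hsorted, List.foldl_cons]
          -- unfold one step of pvGo and resolve the inner match with hf
          rw [pvGo]
          split
          · rename_i heq
            rw [heq] at hf
            cases hf
          · rename_i u' x' v' heq
            rw [heq] at hf
            injection hf with hf
            injection hf with e1 hf
            injection hf with e2 e3
            simp only [e1, e2, e3]
            by_cases hLb : (x.2.2 == "L") = true
            · by_cases hcond : x.1 ≥ bl ∧ x.2.1 - x.1 ≤ s
              · rw [if_pos hLb, if_pos hcond, ih _ hlen']
                have : pvStepB s (c, bl, br) x = (c + 1, x.2.1, br) := by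
                  simp [pvStepB, hLb, hcond.1, hcond.2]
                rw [this]
              · rw [if_pos hLb, if_neg hcond, ih _ hlen']
                have : pvStepB s (c, bl, br) x = (c, bl, br) := by
                  by_cases hfit : x.2.1 - x.1 ≤ s
                  · have hR : (x.2.2 == "R") = false := by
                      simp at hLb ⊢; simp [hLb]
                    have : ¬ (x.1 ≥ bl) := by tauto
                    simp [pvStepB, hLb, hR, hfit, this]
                  · simp [pvStepB, hfit]
                rw [this]
            · by_cases hRb : (x.2.2 == "R") = true
              · by_cases hcond : x.1 ≥ br ∧ x.2.1 - x.1 ≤ s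
                · rw [if_neg (by simp_all), if_pos hRb, if_pos hcond, ih _ hlen']
                  have : pvStepB s (c, bl, br) x = (c + 1, bl, x.2.1) := by
                    simp [pvStepB, hLb, hRb, hcond.1, hcond.2]
                  rw [this]
                · rw [if_neg (by simp_all), if_pos hRb, if_neg hcond, ih _ hlen']
                  have : pvStepB s (c, bl, br) x = (c, bl, br) := by
                    by_cases hfit : x.2.1 - x.1 ≤ s
                    · have : ¬ (x.1 ≥ br) := by tauto
                      simp [pvStepB, hLb, hRb, hfit, this]
                    · simp [pvStepB, hfit]
                  rw [this]
              · rw [if_neg (by simp_all), if_neg (by simp_all), ih _ hlen']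
                have : pvStepB s (c, bl, br) x = (c, bl, br) := by
                  simp [pvStepB, hLb, hRb]
                rw [this]

-- ===== VERDICT (by name: the statement is the Claim_ definition above) =====
theorem get_max_pins_spec : Claim_equal_get_max_pins := by
  intro pins screen_len _
  show get_max_pins pins screen_len = get_max_pins_alt pins screen_len
  show pvMaxPinsInColumn ((pins.filter (fun p => p.2.2 == "L")).map pvF) screen_len
      + pvMaxPinsInColumn ((pins.filter (fun p => p.2.2 == "R")).map pvF) screen_len
      = get_max_pins_alt pins screen_len
  unfold pvMaxPinsInColumn get_max_pins_alt
  rw [pv_sorted_map, pv_sorted_map, ← pv_filter_sorted, ← pv_filter_sorted,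
    pv_go_eq_fold screen_len pins.length pins le_rfl 0 0 0,
    pv_stepB_decompose screen_len _ 0 0 0]
  simp only
  ring
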